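-- pv_equiv track=rewrite | github.com/zzrcxb/EAAO | toolkit/sugar.py | check_last
-- ===== SOURCE A (Python) =====
-- from typing import List, Union, Tuple, Iterable, Any, Callable, Optional, cast, TypeVar, Dict, Set
--
-- def check_last(it: Iterable[Any]) -> Iterable[Tuple[bool, Any]]:
--     it = iter(it)
--     try:
--         cur = next(it)
--     except StopIteration:
--         return
--     else:
--         for next_elem in it:
--             yield False, cur
--             cur = next_elem
--         yield True, cur
-- ===== SOURCE B (Python) =====
-- def check_last(it):
--     items = list(it)
--     n = len(items)
--     for i, x in enumerate(items):
--         yield (i == n - 1), x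
-- ===== Notes on version B (the rewrite author's own statement) =====
-- stated objective: simpler
-- what changed: B materializes the iterable into a list and yields (i == n-1, x) via enumerate, replacing A's next()/StopIteration one-element lookahead buffer with a length comparison.
import Mathlib
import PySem

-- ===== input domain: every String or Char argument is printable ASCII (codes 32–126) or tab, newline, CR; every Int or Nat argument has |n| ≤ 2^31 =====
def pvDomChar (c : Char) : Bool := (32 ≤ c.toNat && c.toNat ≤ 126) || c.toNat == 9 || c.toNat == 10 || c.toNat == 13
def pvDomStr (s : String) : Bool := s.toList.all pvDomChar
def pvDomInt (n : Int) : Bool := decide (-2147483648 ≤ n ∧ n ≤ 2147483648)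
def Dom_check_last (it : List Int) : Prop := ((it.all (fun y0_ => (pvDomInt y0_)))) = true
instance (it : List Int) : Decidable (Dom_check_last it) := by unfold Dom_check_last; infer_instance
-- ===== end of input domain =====

-- B replaces A's one-element lookahead with an index-vs-length comparison over the enumerated list (simpler decomposition).


-- ===== PORT A =====
def check_lastLoop (cur : Int) (rest : List Int) : List (Bool × Int) :=
  match rest with
  | [] => [(true, cur)]
  | next_elem :: it => (false, cur) :: check_lastLoop next_elem it

def check_last (it : List Int) : List (Bool × Int) :=
  match it with
  | [] => []
  | cur :: rest => check_lastLoop cur rest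

-- ===== PORT B =====
def check_last_alt (it : List Int) : List (Bool × Int) :=
  (PySem.List.enumerate it).map (fun p => (decide (p.1 = (it.length : Int) - 1), p.2))

-- ===== PRECONDITION & SPEC =====
def Spec_check_last (it : List Int) (out : List (Bool × Int)) : Prop := out = check_last_alt it
instance (it : List Int) (out : List (Bool × Int)) : Decidable (Spec_check_last it out) := by unfold Spec_check_last; infer_instance

-- ===== CLAIM (what is proved, stated in full; the proofs are below) =====
def Claim_equal_check_last : Prop := ∀ (it : List Int), Dom_check_last it → Spec_check_last it (check_last it)

-- ===== LEMMAS AND PROOFS =====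

-- ===== VERDICT (by name: the statement is the Claim_ definition above) =====
theorem check_last_loop_eq (cur : Int) (rest : List Int) (s : Int) :
    check_lastLoop cur rest =
      (PySem.List.enumerate (cur :: rest) s).map
        (fun p => (decide (p.1 = s + (rest.length : Int)), p.2)) := by
  induction rest generalizing cur s with
  | nil => simp [check_lastLoop, PySem.List.enumerate_cons, PySem.List.enumerate_nil]
  | cons x xs ih =>
      rw [PySem.List.enumerate_cons, List.map_cons]
      have h1 : (decide (s = s + ((x :: xs).length : Int)) ) = false := by
        simp only [decide_eq_false_iff_not, List.length_cons]
        push_cast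
        omega
      simp only [check_lastLoop, h1]
      refine congrArg _ ?_
      rw [ih x (s + 1)]
      apply List.map_congr_left
      intro p _
      congr 2
      simp [List.length_cons]
      constructor <;> intro h <;> omega

theorem check_last_spec : Claim_equal_check_last := by
  intro it _
  unfold Spec_check_last check_last check_last_alt
  match it with
  | [] => simp [PySem.List.enumerate_nil]
  | cur :: rest =>
      show check_lastLoop cur rest = _
      rw [check_last_loop_eq cur rest 0]
      apply List.map_congr_left
      intro p _
      congr 2
      simp
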